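-- pv_equiv track=rewrite | github.com/heernink/CODING | 할인 행사.py | solution
-- ===== SOURCE A (Python) =====
-- import collections
--
-- def solution(want, number, discount):
--     answer = 0
-- 		# 1. 10일간 할인하는 품목의 개수를 셈
--     for i in range(len(discount)-9):
--         tmp = 0
-- 				# 2. 정현이가 원하는 제품의 수량 < 10일간 할인하는 품목의 수량일 경우, tmp + 1
--         for j in dict(zip(want, number)):
--             if collections.Counter(discount[i:10+i])[j] >= dict(zip(want, number))[j]:
--                 tmp += 1
-- 				# 3. 만약 정현이가 원하는 제품을 모두 할인 받을 수 있는 회원등록 날짜라면 answer + 1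
--         if tmp == len(number): answer += 1
--
--     return answer
-- ===== SOURCE B (Python) =====
-- def solution(want, number, discount):
--     d = dict(zip(want, number))
--     need = len(number)
--     answer = 0
--     cnt = {}
--     for i, item in enumerate(discount):
--         if item in d:
--             cnt[item] = cnt.get(item, 0) + 1
--         if i >= 10:
--             old = discount[i - 10]
--             if old in d:
--                 cnt[old] = cnt.get(old, 0) - 1
--         if i >= 9:
--             if sum(1 for k, v in d.items() if cnt.get(k, 0) >= v) == need:
--                 answer += 1
--     return answer
-- ===== Notes on version B (the rewrite author's own statement) =====
-- stated objective: faster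
-- what changed: B builds the want->quantity dict once and slides a 10-day window over discount, updating a per-item count dict incrementally (one item enters, one leaves) instead of rebuilding dict(zip(want,number)) and a Counter of the whole slice for every window and key.
import Mathlib
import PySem

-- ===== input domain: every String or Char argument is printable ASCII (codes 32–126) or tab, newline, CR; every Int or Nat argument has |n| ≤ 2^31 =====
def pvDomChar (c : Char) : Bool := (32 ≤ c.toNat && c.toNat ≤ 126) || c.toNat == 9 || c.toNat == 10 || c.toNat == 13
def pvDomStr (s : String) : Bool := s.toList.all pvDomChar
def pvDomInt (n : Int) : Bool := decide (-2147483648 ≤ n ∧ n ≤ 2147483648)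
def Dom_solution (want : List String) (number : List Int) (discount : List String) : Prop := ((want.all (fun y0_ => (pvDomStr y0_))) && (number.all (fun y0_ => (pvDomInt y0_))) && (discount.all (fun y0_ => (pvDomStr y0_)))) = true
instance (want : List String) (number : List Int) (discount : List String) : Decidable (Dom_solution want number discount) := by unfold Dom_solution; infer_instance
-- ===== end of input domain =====

-- B replaces A's per-window Counter/dict rebuilds by one want-dict built once and a sliding
-- count dict updated incrementally (O(n·w) instead of O(n·w·(w+10))); same return value everywhere.

-- ===== PORT A =====
-- Literal transliteration of A. Counter(window)[j] returns 0 for a missing key, so it is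
-- (counter window).getD j 0; dict(zip(want,number))[j] is looked up with j taken from that very
-- dict's keys, so the lookup never raises and .getD j 0 is exact.
def solution (want : List String) (number : List Int) (discount : List String) : Int :=
  (PySem.List.pyRange 0 (PySem.List.len discount - 9) 1).foldl (fun answer i =>
    let tmp : Int :=
      ((PySem.Dict.ofList (want.zip number)).keys).foldl (fun tmp j =>
        if ((PySem.Dict.counter (PySem.List.slice discount (some i) (some (10 + i)))).getD j 0)
             ≥ ((PySem.Dict.ofList (want.zip number)).getD j 0) then tmp + 1 else tmp) 0
    if tmp = PySem.List.len number then answer + 1 else answer) 0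

-- ===== PORT B =====
-- cnt update of Source B's loop body: add the entering item, and for i ≥ 10 remove the item that
-- left the 10-day window.  discount[i-10] is always in range there, so pyGetD with "" is exact.
def bCnt (discount : List String) (d : PySem.Dict String Int)
    (cnt : PySem.Dict String Int) (i : Int) (item : String) : PySem.Dict String Int :=
  let cnt1 := if d.contains item then cnt.modify item 0 (· + 1) else cnt
  if i ≥ 10 then
    (if d.contains (PySem.List.pyGetD discount (i - 10) "") then
       cnt1.modify (PySem.List.pyGetD discount (i - 10) "") 0 (· - 1)
     else cnt1)
  else cnt1

-- one iteration of Source B's loop: update cnt, then from day 9 on test the window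
def bStep (discount : List String) (d : PySem.Dict String Int) (need : Int)
    (st : Int × PySem.Dict String Int) (p : Int × String) : Int × PySem.Dict String Int :=
  let cnt2 := bCnt discount d st.2 p.1 p.2
  (if p.1 ≥ 9 then
     (if (d.items.foldl (fun s kv => if cnt2.getD kv.1 0 ≥ kv.2 then s + 1 else s) 0) = need
      then st.1 + 1 else st.1)
   else st.1, cnt2)

def solution_alt (want : List String) (number : List Int) (discount : List String) : Int :=
  let d := PySem.Dict.ofList (want.zip number)
  let need := PySem.List.len number
  ((PySem.List.enumerate discount 0).foldl (bStep discount d need)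
     ((0 : Int), PySem.Dict.empty)).1

-- ===== PRECONDITION & SPEC =====
def Spec_solution (want : List String) (number : List Int) (discount : List String) (out : Int) : Prop := out = solution_alt want number discount
instance (want : List String) (number : List Int) (discount : List String) (out : Int) : Decidable (Spec_solution want number discount out) := by unfold Spec_solution; infer_instance

-- ===== CLAIM (what is proved, stated in full; the proofs are below) =====
def Claim_equal_solution : Prop := ∀ (want : List String) (number : List Int) (discount : List String), Dom_solution want number discount → Spec_solution want number discount (solution want number discount)

-- ===== LEMMAS AND PROOFS =====

-- the 10-day window of discount that ends at day m-1 (days max(0,m-10) … m-1)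
def pvWin (discount : List String) (m : Nat) : List String :=
  (discount.take m).drop (m - 10)

-- "the membership day whose window ends at day m is counted"
def pvCond (want : List String) (number : List Int) (discount : List String) (m : Nat) : Bool :=
  decide ((((PySem.Dict.ofList (want.zip number)).keys.countP
      (fun k => decide (((pvWin discount (m+1)).count k : Int)
        ≥ (PySem.Dict.ofList (want.zip number)).getD k 0))) : Int) = PySem.List.len number)

lemma pvInnerSum (d : PySem.Dict String Int) (hn : d.keys.Nodup)
    (cnt : PySem.Dict String Int) (w : List String)
    (hinv : ∀ k, d.contains k = true → cnt.getD k 0 = (w.count k : Int)) :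
    d.items.foldl (fun s kv => if cnt.getD kv.1 0 ≥ kv.2 then s + 1 else s) 0
      = ((d.keys.countP (fun k => decide ((w.count k : Int) ≥ d.getD k 0))) : Int) := by
  rw [PySem.List.foldl_ite_add_one, zero_add, PySem.Dict.items_eq_map_keys d hn 0,
    List.countP_map]
  congr 1
  apply List.countP_congr
  intro k hk
  have hc : d.contains k = true := (PySem.Dict.contains_iff_mem_keys d k).2 hk
  simp [Function.comp, hinv k hc]

lemma inv_step (discount : List String) (d : PySem.Dict String Int)
    (cnt : PySem.Dict String Int) (m : Nat) (x : String) (rest : List String)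
    (hd : discount.drop m = x :: rest)
    (hinv : ∀ k, d.contains k = true → cnt.getD k 0 = ((pvWin discount m).count k : Int)) :
    ∀ k, d.contains k = true →
      (bCnt discount d cnt (m : Int) x).getD k 0 = ((pvWin discount (m+1)).count k : Int) := by
  have hm : m < discount.length := by
    by_contra h
    rw [List.drop_eq_nil_iff.2 (by omega)] at hd
    simp at hd
  have hd2 := (List.drop_eq_getElem_cons hm).symm.trans hd
  have hx : discount[m] = x := by
    injection hd2
  have htake : discount.take (m+1) = discount.take m ++ [x] := by
    rw [List.take_add_one]
    simp [List.getElem?_eq_getElem hm, hx]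
  intro k hk
  by_cases h10 : 10 ≤ m
  · have hlt : m - 10 < (discount.take m).length := by
      rw [List.length_take]; omega
    have hold : (discount.take m)[m-10] = discount[m-10] := List.getElem_take
    have hw0 : pvWin discount m
        = discount[m-10] :: (discount.take m).drop (m - 9) := by
      unfold pvWin
      rw [List.drop_eq_getElem_cons hlt, hold]
      have h1 : m - 10 + 1 = m - 9 := by omega
      rw [h1]
    have hw1 : pvWin discount (m+1)
        = (discount.take m).drop (m - 9) ++ [x] := by
      unfold pvWin
      rw [htake, List.drop_append_of_le_length (by rw [List.length_take]; omega)]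
      have h1 : m + 1 - 10 = m - 9 := by omega
      rw [h1]
    have hget : PySem.List.pyGetD discount ((m : Int) - 10) "" = discount[m-10] := by
      have : (m : Int) - 10 = ((m - 10 : Nat) : Int) := by omega
      rw [this, PySem.List.pyGetD_natCast]
      exact List.getD_eq_getElem _ _ (by omega)
    have h10' : (m : Int) ≥ 10 := by omega
    have hik := hinv k hk
    rw [hw0] at hik
    rw [hw1]
    unfold bCnt
    simp only [if_pos h10', hget]
    by_cases hkx : k = x <;> by_cases hko : k = discount[m-10] <;>
      by_cases hcx : d.contains x = true <;> by_cases hco : d.contains discount[m-10] = true <;>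
      simp_all [PySem.Dict.getD_modify, List.count_cons, List.count_append] <;>
        first
        | omega
        | (intro h; subst h; simp_all)
        | (rw [if_neg (fun h => hko h.symm), if_neg (fun h => hkx h.symm)])
  · have hw0 : pvWin discount m = discount.take m := by
      unfold pvWin
      rw [Nat.sub_eq_zero_of_le (by omega), List.drop_zero]
    have hw1 : pvWin discount (m+1) = discount.take m ++ [x] := by
      unfold pvWin
      rw [Nat.sub_eq_zero_of_le (by omega), List.drop_zero, htake]
    have h10' : ¬ ((m : Int) ≥ 10) := by omega
    have hik := hinv k hk
    rw [hw0] at hik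
    rw [hw1]
    unfold bCnt
    simp only [if_neg h10']
    by_cases hkx : k = x <;> by_cases hcx : d.contains x = true <;>
      simp_all [PySem.Dict.getD_modify, List.count_cons, List.count_append] <;>
      first
      | omega
      | (intro h; subst h; simp_all)

lemma b_fold (want : List String) (number : List Int) (discount : List String) :
    ∀ (l : List String) (m : Nat) (ans : Int) (cnt : PySem.Dict String Int),
      discount.drop m = l →
      (∀ k, (PySem.Dict.ofList (want.zip number)).contains k = true →
        cnt.getD k 0 = ((pvWin discount m).count k : Int)) →
      ((PySem.List.enumerate l (m : Int)).foldl
          (bStep discount (PySem.Dict.ofList (want.zip number)) (PySem.List.len number))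
          (ans, cnt)).1
        = ans + (((List.range' m (discount.length - m)).countP
            (fun e => decide (9 ≤ e) && pvCond want number discount e)) : Int) := by
  intro l
  induction l with
  | nil =>
    intro m ans cnt hd _
    have hm : discount.length ≤ m := List.drop_eq_nil_iff.1 hd
    rw [Nat.sub_eq_zero_of_le hm]
    simp [PySem.List.enumerate]
  | cons x rest ih =>
    intro m ans cnt hd hinv
    have hm : m < discount.length := by
      by_contra h
      rw [List.drop_eq_nil_iff.2 (by omega)] at hd
      simp at hd
    have hrest : discount.drop (m+1) = rest := by
      have hd2 := (List.drop_eq_getElem_cons hm).symm.trans hd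
      simpa using congrArg List.tail hd2
    have hinv' := inv_step discount (PySem.Dict.ofList (want.zip number)) cnt m x rest hd hinv
    rw [PySem.List.enumerate_cons, List.foldl_cons]
    have hcast : (m : Int) + 1 = ((m + 1 : Nat) : Int) := by omega
    rw [hcast, ih (m+1) _ _ hrest (by
      intro k hk
      have := hinv' k hk
      simpa [bStep] using this)]
    -- the first component of one step
    have hstep1 : (bStep discount (PySem.Dict.ofList (want.zip number))
        (PySem.List.len number) (ans, cnt) ((m : Int), x)).1
        = ans + (if decide (9 ≤ m) && pvCond want number discount m then 1 else 0) := by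
      simp only [bStep]
      rw [pvInnerSum _ (PySem.Dict.nodup_keys_ofList _) _ _ (fun k hk => hinv' k hk)]
      by_cases h9 : 9 ≤ m
      · have h9' : (m : Int) ≥ 9 := by omega
        rw [if_pos h9']
        unfold pvCond
        simp only [decide_eq_true h9, Bool.true_and, decide_eq_true_eq]
        split_ifs <;> omega
      · have h9' : ¬ ((m : Int) ≥ 9) := by omega
        rw [if_neg h9']
        simp [decide_eq_false h9]
    rw [hstep1]
    have hlen : discount.length - m = (discount.length - (m+1)) + 1 := by omega
    rw [hlen, List.range'_succ, List.countP_cons]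
    push_cast
    ring

lemma b_eq (want : List String) (number : List Int) (discount : List String) :
    solution_alt want number discount
      = (((List.range discount.length).countP
          (fun e => decide (9 ≤ e) && pvCond want number discount e)) : Int) := by
  unfold solution_alt
  have h0 : ((0 : Nat) : Int) = (0 : Int) := by norm_num
  have := b_fold want number discount discount 0 0 PySem.Dict.empty (by simp)
    (by intro k _; simp [pvWin, PySem.Dict.getD_empty])
  rw [h0] at this
  rw [this]
  rw [Nat.sub_zero, ← List.range_eq_range', zero_add]

lemma a_eq (want : List String) (number : List Int) (discount : List String) :
    solution want number discount
      = (((List.range (discount.length - 9)).countP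
          (fun s => pvCond want number discount (s + 9))) : Int) := by
  unfold solution
  by_cases h9 : 9 ≤ discount.length
  · have hcast : PySem.List.len discount - 9 = ((discount.length - 9 : Nat) : Int) := by
      rw [PySem.List.len_eq]; omega
    rw [hcast, PySem.List.pyRange_zero_natCast, List.foldl_map, PySem.List.foldl_ite_add_one,
      zero_add]
    congr 1
    apply List.countP_congr
    intro s _
    have hslice : PySem.List.slice discount (some ((s : Nat) : Int))
        (some (10 + ((s : Nat) : Int))) = (discount.drop s).take 10 := by
      have : (10 : Int) + ((s : Nat) : Int) = ((s : Nat) : Int) + ((10 : Nat) : Int) := by omega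
      rw [this, PySem.List.slice_natCast_add]
    have hwin : pvWin discount (s + 9 + 1) = (discount.drop s).take 10 := by
      unfold pvWin
      have h1 : s + 9 + 1 - 10 = s := by omega
      rw [h1, List.drop_take]
      congr 1
      omega
    have hinner : ((PySem.Dict.ofList (want.zip number)).keys.foldl (fun tmp j =>
        if ((PySem.Dict.counter (PySem.List.slice discount (some ((s : Nat) : Int))
              (some (10 + ((s : Nat) : Int))))).getD j 0)
             ≥ ((PySem.Dict.ofList (want.zip number)).getD j 0) then tmp + 1 else tmp) 0)
        = (((PySem.Dict.ofList (want.zip number)).keys.countP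
            (fun k => decide (((pvWin discount (s + 9 + 1)).count k : Int)
              ≥ (PySem.Dict.ofList (want.zip number)).getD k 0))) : Int) := by
      rw [PySem.List.foldl_ite_add_one, zero_add]
      congr 1
      apply List.countP_congr
      intro k _
      simp [PySem.Dict.getD_counter, hslice, hwin, List.count]
    simp only [hinner]
    unfold pvCond
    simp only [decide_eq_true_eq]
  · have hempty : PySem.List.pyRange 0 (PySem.List.len discount - 9) 1 = [] := by
      rw [PySem.List.len_eq]
      simp [PySem.List.pyRange]
      omega
    rw [hempty, Nat.sub_eq_zero_of_le (by omega)]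
    simp

lemma count_shift (want : List String) (number : List Int) (discount : List String) :
    ((List.range discount.length).countP
        (fun e => decide (9 ≤ e) && pvCond want number discount e))
      = ((List.range (discount.length - 9)).countP
          (fun s => pvCond want number discount (s + 9))) := by
  by_cases h9 : 9 ≤ discount.length
  · have hsplit : discount.length = 9 + (discount.length - 9) := by omega
    conv_lhs => rw [hsplit, List.range_add]
    rw [List.countP_append]
    have hz : ((List.range 9).countP
        (fun e => decide (9 ≤ e) && pvCond want number discount e)) = 0 := by
      apply List.countP_eq_zero.2
      intro e he
      have : e < 9 := List.mem_range.1 he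
      simp [Nat.not_le.2 this]
    rw [hz, Nat.zero_add, List.countP_map]
    apply List.countP_congr
    intro s _
    have h9s : 9 ≤ s + 9 := by omega
    simp only [Function.comp, Nat.add_comm 9 s, decide_eq_true h9s, Bool.true_and]
  · rw [Nat.sub_eq_zero_of_le (by omega)]
    simp only [List.range_zero, List.countP_nil]
    apply List.countP_eq_zero.2
    intro e he
    have hlt : e < discount.length := List.mem_range.1 he
    have h : ¬ 9 ≤ e := by omega
    simp [h]

-- ===== VERDICT (by name: the statement is the Claim_ definition above) =====
theorem solution_spec : Claim_equal_solution := by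
  intro want number discount _
  unfold Spec_solution
  rw [a_eq, b_eq, count_shift]
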